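-- pv_equiv track=rewrite | github.com/denisousa/code_clone_in_agent_md | omniccg/code_operations.py | _remove_hash_comment_line
-- ===== SOURCE A (Python) =====
-- def _remove_hash_comment_line(line: str) -> str:
--     """
--     Remove everything after '#' in a single line,
--     ignoring '#' that appear inside simple/double-quoted strings.
--     """
--     result = []
--     in_string = False
--     string_char = ""
--     escaping = False
--     in_comment = False
--
--     for ch in line:
--         # If we're already in a comment, keep only the newline (if any)
--         if in_comment:
--             if ch in ("\n", "\r"):
--                 result.append(ch)
--                 in_comment = False
--             continue
--
--         if in_string:
--             result.append(ch)
--             if escaping: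
--                 escaping = False
--             elif ch == "\\":
--                 escaping = True
--             elif ch == string_char:
--                 in_string = False
--             continue
--
--         # Outside string / comment
--         if ch in ("'", '"'):
--             in_string = True
--             string_char = ch
--             result.append(ch)
--             continue
--
--         if ch == "#":
--             # Start of a comment: ignore everything until newline
--             in_comment = True
--             continue
--
--         result.append(ch)
--
--     return "".join(result)
-- ===== SOURCE B (Python) =====
-- def _remove_hash_comment_line(line: str) -> str:
--     """Skip-ahead rewrite: jump over whole quoted chunks and whole comments
--     instead of tracking per-character state."""
--     out = []
--     i = 0
--     n = len(line)
--     while i < n: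
--         ch = line[i]
--         if ch == "#":
--             # skip the whole comment: everything up to (not including) the newline
--             j = i + 1
--             while j < n and line[j] not in "\r\n":
--                 j += 1
--             i = j
--         elif ch in "'\"":
--             # copy the whole string literal in one slice
--             j = i + 1
--             while j < n:
--                 c = line[j]
--                 if c == "\\":
--                     j += 2
--                 elif c == ch:
--                     j += 1
--                     break
--                 else:
--                     j += 1
--             out.append(line[i:j])
--             i = j
--         else:
--             out.append(ch)
--             i += 1
--     return "".join(out)
-- ===== Notes on version B (the rewrite author's own statement) =====
-- stated objective: alternative
-- what changed: Replaces A's per-character five-variable state machine with a skip-ahead scanner that, on a quote, consumes the whole string literal in one inner scan and appends it as a single slice, and on a hash character jumps directly to the next newline, keeping no cross-iteration state.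
import Mathlib
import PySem

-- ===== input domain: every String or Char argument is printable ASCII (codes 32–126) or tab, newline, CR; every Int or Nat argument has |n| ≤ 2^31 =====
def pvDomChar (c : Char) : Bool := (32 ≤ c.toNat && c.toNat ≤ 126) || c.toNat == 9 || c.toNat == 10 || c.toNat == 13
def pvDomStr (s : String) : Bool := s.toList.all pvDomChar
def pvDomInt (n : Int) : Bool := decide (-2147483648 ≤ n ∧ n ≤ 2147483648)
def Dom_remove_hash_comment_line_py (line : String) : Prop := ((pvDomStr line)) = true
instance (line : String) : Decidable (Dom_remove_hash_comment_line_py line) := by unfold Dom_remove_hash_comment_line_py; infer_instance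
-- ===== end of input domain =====

-- B replaces A's per-character state machine by a skip-ahead scanner that copies whole
-- quoted chunks and drops whole comments in one step (objective: alternative structure).

-- ===== PORT A =====
-- A's loop state: result so far, in_string, string_char, escaping, in_comment
structure StA where
  res : List Char
  instr : Bool
  sc : Char
  esc : Bool
  incom : Bool

def stepA (st : StA) (ch : Char) : StA :=
  if st.incom then
    if ch == '\n' || ch == '\r' then { st with res := st.res ++ [ch], incom := false }
    else st
  else if st.instr then
    let st := { st with res := st.res ++ [ch] }
    if st.esc then { st with esc := false }
    else if ch == '\\' then { st with esc := true }
    else if ch == st.sc then { st with instr := false }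
    else st
  else if ch == '\'' || ch == '"' then
    { st with instr := true, sc := ch, res := st.res ++ [ch] }
  else if ch == '#' then { st with incom := true }
  else { st with res := st.res ++ [ch] }

def remove_hash_comment_line_py (line : String) : String :=
  String.mk (line.toList.foldl stepA ⟨[], false, ' ', false, false⟩).res

-- ===== PORT B =====
-- scan a string literal body up to and including the closing quote q
-- (a backslash consumes the following character unconditionally)
def scanStr (q : Char) : List Char → List Char × List Char
  | [] => ([], [])
  | c :: rest =>
    if c == '\\' then
      match rest with
      | [] => ([c], [])
      | d :: rest' => let (s, r) := scanStr q rest'; (c :: d :: s, r)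
    else if c == q then ([c], rest)
    else let (s, r) := scanStr q rest; (c :: s, r)

theorem scanStr_eq_cons (q c : Char) (rest : List Char) :
    scanStr q (c :: rest) =
      if c == '\\' then
        match rest with
        | [] => ([c], [])
        | d :: rest' => let (s, r) := scanStr q rest'; (c :: d :: s, r)
      else if c == q then ([c], rest)
      else let (s, r) := scanStr q rest; (c :: s, r) := by
  rw [scanStr.eq_def]

theorem scanStr_snd_len (q : Char) : (l : List Char) → (scanStr q l).2.length ≤ l.length
  | [] => by simp [scanStr]
  | c :: rest => by
    rw [scanStr_eq_cons]
    by_cases h1 : (c == '\\') = true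
    · match rest with
      | [] => simp [h1]
      | d :: rest' =>
        have ih := scanStr_snd_len q rest'
        simp [h1]; omega
    · by_cases h2 : (c == q) = true
      · simp [h1, h2]
      · have ih := scanStr_snd_len q rest
        simp [h1, h2]; omega
termination_by l => l.length
decreasing_by all_goals (simp; try omega)

def goB : List Char → List Char
  | [] => []
  | c :: rest =>
    if c == '#' then
      goB (rest.dropWhile (fun d => !(d == '\n' || d == '\r')))
    else if c == '\'' || c == '"' then
      let p := scanStr c rest
      c :: p.1 ++ goB p.2
    else
      c :: goB rest
termination_by l => l.length
decreasing_by
  · exact Nat.lt_succ_of_le (List.length_dropWhile_le _ _)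
  · exact Nat.lt_succ_of_le (scanStr_snd_len c rest)
  · simp

def remove_hash_comment_line_py_alt (line : String) : String :=
  String.mk (goB line.toList)

-- ===== PRECONDITION & SPEC =====
def Spec_remove_hash_comment_line_py (line : String) (out : String) : Prop := out = remove_hash_comment_line_py_alt line
instance (line : String) (out : String) : Decidable (Spec_remove_hash_comment_line_py line out) := by unfold Spec_remove_hash_comment_line_py; infer_instance

-- ===== CLAIM (what is proved, stated in full; the proofs are below) =====
def Claim_equal_remove_hash_comment_line_py : Prop := ∀ (line : String), Dom_remove_hash_comment_line_py line → Spec_remove_hash_comment_line_py line (remove_hash_comment_line_py line)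

-- ===== LEMMAS AND PROOFS =====

-- unfolding lemma for goB on a cons cell
theorem goB_cons (c : Char) (rest : List Char) :
    goB (c :: rest) =
      if c == '#' then goB (rest.dropWhile (fun d => !(d == '\n' || d == '\r')))
      else if c == '\'' || c == '"' then c :: (scanStr c rest).1 ++ goB (scanStr c rest).2
      else c :: goB rest := by
  rw [goB.eq_def]

-- combined invariant: from each of A's three loop modes, the rest of A's fold
-- computes what B's skip-ahead scanner computes
theorem foldA_modes (n : Nat) : ∀ l : List Char, l.length ≤ n →
    (∀ acc sc, (l.foldl stepA ⟨acc, false, sc, false, false⟩).res = acc ++ goB l) ∧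
    (∀ acc sc, (l.foldl stepA ⟨acc, false, sc, false, true⟩).res =
        acc ++ goB (l.dropWhile (fun d => !(d == '\n' || d == '\r')))) ∧
    (∀ acc q, (l.foldl stepA ⟨acc, true, q, false, false⟩).res =
        acc ++ (scanStr q l).1 ++ goB (scanStr q l).2) := by
  induction n with
  | zero =>
    intro l hl
    have hnil : l = [] := List.eq_nil_of_length_eq_zero (Nat.le_zero.mp hl)
    subst hnil
    refine ⟨?_, ?_, ?_⟩ <;> intro acc x <;> simp [goB, scanStr]
  | succ n ih =>
    intro l hl
    match l with
    | [] => refine ⟨?_, ?_, ?_⟩ <;> intro acc x <;> simp [goB, scanStr]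
    | c :: rest =>
      have hr : rest.length ≤ n := by simp at hl; omega
      refine ⟨?_, ?_, ?_⟩
      · -- normal mode
        intro acc sc
        simp only [List.foldl_cons]
        by_cases hq : (c == '\'' || c == '"') = true
        · have hst : stepA ⟨acc, false, sc, false, false⟩ c = ⟨acc ++ [c], true, c, false, false⟩ := by
            simp [stepA, hq]
          rw [hst, (ih rest hr).2.2 (acc ++ [c]) c, goB_cons]
          have hnh : (c == '#') = false := by
            rcases Bool.or_eq_true_iff.mp hq with h | h <;> simp [eq_of_beq h]
          simp [hnh, hq]
        · by_cases hh : (c == '#') = true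
          · have hst : stepA ⟨acc, false, sc, false, false⟩ c = ⟨acc, false, sc, false, true⟩ := by
              simp [stepA, eq_of_beq hh]
            rw [hst, (ih rest hr).2.1 acc sc, goB_cons]
            simp [hh]
          · have hst : stepA ⟨acc, false, sc, false, false⟩ c = ⟨acc ++ [c], false, sc, false, false⟩ := by
              simp [stepA, hq, hh]
            rw [hst, (ih rest hr).1 (acc ++ [c]) sc, goB_cons]
            simp [hh, hq]
      · -- comment mode
        intro acc sc
        simp only [List.foldl_cons]
        by_cases hnl : (c == '\n' || c == '\r') = true
        · have hst : stepA ⟨acc, false, sc, false, true⟩ c = ⟨acc ++ [c], false, sc, false, false⟩ := by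
            simp [stepA, hnl]
          have hnh : (c == '#') = false := by
            rcases Bool.or_eq_true_iff.mp hnl with h | h <;> simp [eq_of_beq h]
          have hnq : (c == '\'' || c == '"') = false := by
            rcases Bool.or_eq_true_iff.mp hnl with h | h <;> simp [eq_of_beq h]
          rw [hst, (ih rest hr).1 (acc ++ [c]) sc]
          rw [List.dropWhile_cons]
          simp [hnl, goB_cons, hnh, hnq]
        · have hst : stepA ⟨acc, false, sc, false, true⟩ c = ⟨acc, false, sc, false, true⟩ := by
            simp [stepA, hnl]
          rw [hst, (ih rest hr).2.1 acc sc]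
          rw [List.dropWhile_cons]
          simp [hnl]
      · -- string mode
        intro acc q
        simp only [List.foldl_cons]
        rw [scanStr_eq_cons]
        by_cases he : (c == '\\') = true
        · have hst : stepA ⟨acc, true, q, false, false⟩ c = ⟨acc ++ [c], true, q, true, false⟩ := by
            simp [stepA, he]
          rw [hst]
          match rest with
          | [] => simp [eq_of_beq he, goB]
          | d :: rest' =>
            have hst2 : stepA ⟨acc ++ [c], true, q, true, false⟩ d
                = ⟨acc ++ [c] ++ [d], true, q, false, false⟩ := by
              simp [stepA]
            have hr' : rest'.length ≤ n := by simp at hl; omega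
            simp only [List.foldl_cons]
            rw [hst2, (ih rest' hr').2.2 (acc ++ [c] ++ [d]) q]
            simp [he]
        · by_cases hc : (c == q) = true
          · have hst : stepA ⟨acc, true, q, false, false⟩ c = ⟨acc ++ [c], false, q, false, false⟩ := by
              simp [stepA, he, hc]
            rw [hst, (ih rest hr).1 (acc ++ [c]) q]
            simp [he, hc]
          · have hst : stepA ⟨acc, true, q, false, false⟩ c = ⟨acc ++ [c], true, q, false, false⟩ := by
              simp [stepA, he, hc]
            rw [hst, (ih rest hr).2.2 (acc ++ [c]) q]
            simp [he, hc]

-- ===== VERDICT (by name: the statement is the Claim_ definition above) =====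
theorem remove_hash_comment_line_py_spec : Claim_equal_remove_hash_comment_line_py := by
  intro line _
  unfold Spec_remove_hash_comment_line_py remove_hash_comment_line_py remove_hash_comment_line_py_alt
  have h := (foldA_modes line.toList.length line.toList le_rfl).1 [] ' '
  rw [h]; rfl
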